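-- pv_equiv track=rewrite | github.com/kkkapuq/PS_study | Boong/Python/230126_프로그래머스_42891_무지의 먹방 라이브/1.py | solution
-- ===== SOURCE A (Python) =====
-- import heapq
--
-- def solution(food_times, k):
--     answer = -1
--
--     # 방송 중단 전에 음식을 다 먹으면
--     if sum(food_times) <= k:
--         return answer
--
--     foodList = []
--     # 우선순위 큐에 음식 번호랑 음식 넣기
--     for index, i in enumerate(food_times):
--         heapq.heappush(foodList, (i, index+1))
--
--     # 남아있는 음식의 길이
--     l = len(foodList)
--     # 음식을 먹는데 드는 총 시간
--     time = 0
--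
--     # 현재 음식을 먹기 위해 필요한 시간((현재음식 시간 - 이전음식 시간) * 남은음식갯수) > k 면 반복문 종료
--     while (foodList[0][0] - time) * l < k:
--         # k까지 도달하는 시간을 빼주기
--         k -= (foodList[0][0] - time) * l
--         # time에 총 시간 더해주기
--         time += (foodList[0][0] - time)
--         # 음식 길이 하나 줄여주기
--         l -= 1
--         # pop 해주기
--         heapq.heappop(foodList)
--
--     # 음식 번호 기준으로 재정렬
--     sortedList = sorted(foodList, key = lambda x : x[1])
--     # 줄어든 k를 기준으로, k % l 번째 음식이 정답...
--     answer = sortedList[k % l][1]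
--     return answer
-- ===== SOURCE B (Python) =====
-- def solution(food_times, k):
--     # Eat the broadcast off the sorted times with prefix-sum arithmetic and a
--     # binary search for the cutoff, instead of an incremental heap-pop loop.
--     if sum(food_times) <= k:
--         return -1
--     n = len(food_times)
--     pairs = sorted((t, i + 1) for i, t in enumerate(food_times))
--     # T[j] = total seconds consumed once the first j+1 foods (in time order)
--     # are completely eaten: prefix_sum(j) + pairs[j][0] * (n - 1 - j).
--     T = []
--     prefix = 0
--     for j in range(n):
--         prefix += pairs[j][0]
--         T.append(prefix + pairs[j][0] * (n - 1 - j))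
--     # T is non-decreasing; find the first j with T[j] >= k (binary search).
--     lo, hi = 0, n
--     while lo < hi:
--         mid = (lo + hi) // 2
--         if T[mid] < k:
--             lo = mid + 1
--         else:
--             hi = mid
--     m = lo                      # number of foods fully eaten
--     rem = k - (T[m - 1] if m > 0 else 0)
--     tail = sorted(pairs[m:], key=lambda p: p[1])
--     return tail[rem % len(tail)][1]
-- ===== Notes on version B (the rewrite author's own statement) =====
-- stated objective: alternative
-- what changed: Replaces A's heap-building and incremental pop-and-subtract while-loop by one sort of (time, index) pairs, a closed-form prefix-consumption array, and a binary search for the cutoff prefix of fully-eaten foods.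
import Mathlib
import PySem

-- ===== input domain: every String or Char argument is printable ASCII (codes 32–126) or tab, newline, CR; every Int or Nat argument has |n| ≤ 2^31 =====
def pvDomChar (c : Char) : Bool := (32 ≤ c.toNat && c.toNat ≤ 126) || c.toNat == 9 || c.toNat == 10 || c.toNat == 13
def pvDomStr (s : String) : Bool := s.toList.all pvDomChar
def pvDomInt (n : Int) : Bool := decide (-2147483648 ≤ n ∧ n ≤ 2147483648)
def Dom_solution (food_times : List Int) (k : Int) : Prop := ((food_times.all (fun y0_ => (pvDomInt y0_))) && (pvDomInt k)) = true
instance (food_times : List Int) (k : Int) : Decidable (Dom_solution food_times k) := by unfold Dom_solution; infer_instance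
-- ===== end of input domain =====

-- B replaces A's heap-pop state machine by one sort plus prefix-consumption
-- arithmetic and a binary search for the cutoff (alternative decomposition).
-- ===== PORT A =====
-- heapq is modelled as a list kept sorted in ascending (time, index) order:
-- A observes the heap only through its minimum foodList[0], heappop (pop-min,
-- here the head) and a final `sorted` by the index key (unique, since the
-- indices 1..n are distinct), so the model is observationally exact.
def heappushA (fl : List (Int × Int)) (x : Int × Int) : List (Int × Int) :=
  PySem.List.insertBy (fun a b => decide (toLex a < toLex b)) x fl

-- the while loop; [] is where Python raises IndexError (outside Pre_)
def loopA : List (Int × Int) → Int → Int → Int → (List (Int × Int) × Int × Int)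
  | [], _, k, l => ([], k, l)
  | (t, i) :: rest, time, k, l =>
      if (t - time) * l < k then loopA rest t (k - (t - time) * l) (l - 1)
      else ((t, i) :: rest, k, l)

def solution (food_times : List Int) (k : Int) : Int :=
  if food_times.sum ≤ k then -1
  else
    let foodList := ((PySem.List.enumerate food_times).map (fun p => (p.2, p.1 + 1))).foldl heappushA []
    let l : Int := (foodList.length : Int)
    let r := loopA foodList 0 k l
    let sortedList := PySem.List.sorted r.1 (fun x => x.2) false
    -- sortedList[k % l][1]; the default is unreachable inside Pre_
    (PySem.List.pyGetD sortedList (PySem.Int.mod r.2.1 r.2.2) (0, -1)).2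

-- ===== PORT B =====
-- the while lo < hi loop; lo, hi are non-negative Python ints, so (lo+hi)//2
-- is Nat division.  fuel is only a totality device: hi - lo strictly decreases
-- each iteration, so any fuel ≥ hi - lo runs the loop to its real end (lo = hi)
def bsearchB (T : List Int) (k : Int) : Nat → Nat → Nat → Nat
  | 0, lo, _hi => lo
  | fuel + 1, lo, hi =>
    if lo < hi then
      let mid := (lo + hi) / 2
      if PySem.List.pyGetD T (mid : Int) 0 < k then bsearchB T k fuel (mid + 1) hi
      else bsearchB T k fuel lo mid
    else lo

def solution_alt (food_times : List Int) (k : Int) : Int :=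
  if food_times.sum ≤ k then -1
  else
    let n := food_times.length
    let pairs := PySem.List.sorted
      ((PySem.List.enumerate food_times).map (fun p => (p.2, p.1 + 1)))
      (fun p => toLex p) false
    let T := ((PySem.List.pyRange 0 (n : Int) 1).foldl
      (fun (st : Int × List Int) j =>
        let t := (PySem.List.pyGetD pairs j (0, 0)).1
        let pre := st.1 + t
        (pre, st.2 ++ [pre + t * ((n : Int) - 1 - j)])) (0, [])).2
    let m := bsearchB T k n 0 n
    let rem := k - (if 0 < m then PySem.List.pyGetD T ((m : Int) - 1) 0 else 0)
    let tail := PySem.List.sorted (pairs.drop m) (fun p => p.2) false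
    -- tail[rem % len(tail)][1]; the default is unreachable inside Pre_
    (PySem.List.pyGetD tail (PySem.Int.mod rem (tail.length : Int)) (0, -1)).2

-- ===== PRECONDITION & SPEC =====
-- Pre_ excludes only the empty list with k < 0, where A raises IndexError
-- (and B raises ZeroDivisionError); A returns on every other input.
def Pre_solution (food_times : List Int) (k : Int) : Prop := food_times = [] → 0 ≤ k
instance (food_times : List Int) (k : Int) : Decidable (Pre_solution food_times k) := by unfold Pre_solution; infer_instance

def pvWitness_solution : List Int × Int := ([3, 1, 2], 4)

def Spec_solution (food_times : List Int) (k : Int) (out : Int) : Prop := out = solution_alt food_times k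
instance (food_times : List Int) (k : Int) (out : Int) : Decidable (Spec_solution food_times k out) := by unfold Spec_solution; infer_instance

-- ===== CLAIM (what is proved, stated in full; the proofs are below) =====
def Claim_equal_solution : Prop := ∀ (food_times : List Int) (k : Int), Dom_solution food_times k → Pre_solution food_times k → Spec_solution food_times k (solution food_times k)

-- ===== LEMMAS AND PROOFS =====

-- proof-side abbreviations over the sorted pair list s
-- Tv s j = total time consumed once the first j+1 foods (in time order) are gone
def Tv (s : List (Int × Int)) (j : Nat) : Int :=
  (((s.map Prod.fst).take (j + 1)).sum) + (s.map Prod.fst).getD j 0 * ((s.length : Int) - 1 - j)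
-- consumption strictly below index j
def Tb (s : List (Int × Int)) (j : Nat) : Int := if j = 0 then 0 else Tv s (j - 1)
-- the `time` accumulator of A's loop after j pops
def tOf (s : List (Int × Int)) (j : Nat) : Int := if j = 0 then 0 else (s.map Prod.fst).getD (j - 1) 0
-- the cutoff: first j with j = length or k ≤ Tv s j
def mIdx (s : List (Int × Int)) (k : Int) : Nat :=
  Nat.find (p := fun i => s.length ≤ i ∨ k ≤ Tv s i) ⟨s.length, Or.inl le_rfl⟩

lemma fst_getD (s : List (Int × Int)) (j : Nat) :
    (s.getD j (0, 0)).1 = (s.map Prod.fst).getD j 0 := by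
  rcases Nat.lt_or_ge j s.length with h | h
  · rw [List.getD_eq_getElem _ _ h, List.getD_eq_getElem _ _ (by simpa using h)]
    simp
  · rw [List.getD_eq_default _ _ h, List.getD_eq_default _ _ (by simpa using h)]

lemma sum_take_succ_getD (vs : List Int) (j : Nat) (h : j < vs.length) :
    (vs.take (j + 1)).sum = (vs.take j).sum + vs.getD j 0 := by
  rw [List.sum_take_succ _ _ h, List.getD_eq_getElem _ _ h]

lemma Tv_step (s : List (Int × Int)) (j : Nat) (h : j < s.length) :
    Tv s j = Tb s j + ((s.map Prod.fst).getD j 0 - tOf s j) * ((s.length : Int) - j) := by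
  have hl : (s.map Prod.fst).length = s.length := by simp
  cases j with
  | zero =>
    simp only [Tv, Tb, tOf]
    rw [sum_take_succ_getD _ 0 (by omega)]
    simp; ring
  | succ j' =>
    simp only [Tv, Tb, tOf, Nat.succ_ne_zero, Nat.add_sub_cancel]
    rw [sum_take_succ_getD _ (j' + 1) (by omega)]
    push_cast; ring

lemma Tv_mono (s : List (Int × Int))
    (hs : (s.map Prod.fst).Pairwise (· ≤ ·)) :
    ∀ i j, i ≤ j → j < s.length → Tv s i ≤ Tv s j := by
  have hl : (s.map Prod.fst).length = s.length := by simp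
  have step : ∀ j, j + 1 < s.length → Tv s j ≤ Tv s (j + 1) := by
    intro j hj
    have hv : (s.map Prod.fst).getD j 0 ≤ (s.map Prod.fst).getD (j + 1) 0 := by
      rw [List.getD_eq_getElem _ _ (by omega), List.getD_eq_getElem _ _ (by omega)]
      exact List.pairwise_iff_getElem.1 hs j (j+1) (by omega) (by omega) (by omega)
    have h1 := Tv_step s (j+1) hj
    rw [h1]
    have : Tb s (j+1) = Tv s j := by simp [Tb]
    have ht : tOf s (j+1) = (s.map Prod.fst).getD j 0 := by simp [tOf]
    rw [this, ht]
    have hpos : (0:Int) ≤ (s.length : Int) - ((j+1 : Nat) : Int) := by push_cast; omega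
    nlinarith [sub_nonneg.2 hv]
  intro i j hij hj
  induction j with
  | zero =>
    have : i = 0 := by omega
    subst this; rfl
  | succ j' ih =>
    rcases Nat.lt_or_ge i (j'+1) with h | h
    · exact le_trans (ih (by omega) (by omega)) (step j' hj)
    · have : i = j' + 1 := by omega
      subst this; rfl

lemma Tv_last (s : List (Int × Int)) (h : s ≠ []) :
    Tv s (s.length - 1) = (s.map Prod.fst).sum := by
  have hn : 1 ≤ s.length := List.length_pos_iff.2 h
  simp only [Tv]
  have h1 : s.length - 1 + 1 = s.length := by omega
  rw [h1, List.take_of_length_le (by simp)]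
  have : ((s.length : Int) - 1 - ((s.length - 1 : Nat) : Int)) = 0 := by push_cast [hn]; ring
  rw [this, mul_zero, add_zero]

lemma mIdx_le (s : List (Int × Int)) (k : Int) : mIdx s k ≤ s.length :=
  Nat.find_le (Or.inl le_rfl)

lemma Tv_lt_of_lt_mIdx (s : List (Int × Int)) (k : Int) {i : Nat} (h : i < mIdx s k) :
    i < s.length ∧ Tv s i < k := by
  have := Nat.find_min (p := fun i => s.length ≤ i ∨ k ≤ Tv s i) ⟨s.length, Or.inl le_rfl⟩ h
  push Not at this
  exact ⟨by omega, this.2⟩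

lemma mIdx_spec (s : List (Int × Int)) (k : Int) :
    s.length ≤ mIdx s k ∨ k ≤ Tv s (mIdx s k) :=
  Nat.find_spec (p := fun i => s.length ≤ i ∨ k ≤ Tv s i) ⟨s.length, Or.inl le_rfl⟩

lemma k_le_Tv_mIdx (s : List (Int × Int)) (k : Int) (h : mIdx s k < s.length) :
    k ≤ Tv s (mIdx s k) := by
  rcases mIdx_spec s k with h' | h'
  · omega
  · exact h'

lemma mIdx_lt_of (s : List (Int × Int)) (k : Int) (h : s ≠ [])
    (hk : k < (s.map Prod.fst).sum) : mIdx s k < s.length := by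
  have hn : 1 ≤ s.length := List.length_pos_iff.2 h
  have : mIdx s k ≤ s.length - 1 := Nat.find_le (Or.inr (by rw [Tv_last s h]; omega))
  omega

lemma loopA_char (s : List (Int × Int)) (k : Int) (hm : mIdx s k < s.length) :
    ∀ j, j ≤ mIdx s k →
      loopA (s.drop j) (tOf s j) (k - Tb s j) ((s.length : Int) - j)
        = (s.drop (mIdx s k), k - Tb s (mIdx s k), (s.length : Int) - mIdx s k) := by
  intro j hj
  induction hfuel : mIdx s k - j generalizing j with
  | zero =>
    have hj' : j = mIdx s k := by omega
    subst hj'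
    rcases hp : s[mIdx s k] with ⟨t, i⟩
    have hgd : (s.map Prod.fst).getD (mIdx s k) 0 = t := by
      rw [List.getD_eq_getElem _ _ (by simpa using hm)]; simp [hp]
    have hcond : ¬ ((t - tOf s (mIdx s k)) * ((s.length : Int) - mIdx s k) < k - Tb s (mIdx s k)) := by
      have := Tv_step s (mIdx s k) hm
      have hk := k_le_Tv_mIdx s k hm
      rw [hgd] at this
      omega
    rw [List.drop_eq_getElem_cons hm, hp]
    simp only [loopA]
    rw [if_neg hcond]
  | succ f ih =>
    have hjlt : j < mIdx s k := by omega
    have hjn : j < s.length := by omega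
    rcases hp : s[j] with ⟨t, i⟩
    have hgd : (s.map Prod.fst).getD j 0 = t := by
      rw [List.getD_eq_getElem _ _ (by simpa using hjn)]; simp [hp]
    have hTv := Tv_step s j hjn
    rw [hgd] at hTv
    have hTvlt : Tv s j < k := (Tv_lt_of_lt_mIdx s k hjlt).2
    have hcond : (t - tOf s j) * ((s.length : Int) - j) < k - Tb s j := by omega
    rw [List.drop_eq_getElem_cons hjn, hp]
    simp only [loopA]
    rw [if_pos hcond]
    have h1 : tOf s (j+1) = t := by simp only [tOf, Nat.succ_ne_zero, Nat.add_sub_cancel]; exact hgd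
    have h2 : Tb s (j+1) = Tv s j := by simp [Tb]
    have e1 : k - Tb s j - (t - tOf s j) * ((s.length : Int) - j) = k - Tb s (j+1) := by
      rw [h2]; omega
    have e2 : (s.length : Int) - j - 1 = (s.length : Int) - ((j+1 : Nat) : Int) := by push_cast; ring
    rw [e1, e2, ← h1]
    exact ih (j+1) (by omega) (by omega)

lemma mIdx_eq_of (s : List (Int × Int)) (k : Int) (lo : Nat) (hlo : lo ≤ s.length)
    (h1 : ∀ i, i < lo → Tv s i < k) (h2 : lo < s.length → k ≤ Tv s lo) :
    mIdx s k = lo := by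
  have hub : mIdx s k ≤ lo := by
    rcases Nat.lt_or_ge lo s.length with h | h
    · exact Nat.find_le (Or.inr (h2 h))
    · have : lo = s.length := by omega
      subst this; exact mIdx_le s k
  have hlb : lo ≤ mIdx s k := by
    by_contra hc
    push Not at hc
    have hlt : Tv s (mIdx s k) < k := h1 _ hc
    have := k_le_Tv_mIdx s k (by omega)
    omega
  omega

lemma getD_T (s : List (Int × Int)) (i : Nat) (h : i < s.length) :
    PySem.List.pyGetD ((List.range s.length).map (Tv s)) (i : Int) 0 = Tv s i := by
  rw [PySem.List.pyGetD_natCast]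
  rw [List.getD_eq_getElem _ _ (by simpa using h)]
  simp

lemma bsearch_char (s : List (Int × Int)) (k : Int)
    (hs : (s.map Prod.fst).Pairwise (· ≤ ·)) :
    ∀ fuel lo hi, hi - lo ≤ fuel → lo ≤ hi → hi ≤ s.length →
      (∀ i, i < lo → Tv s i < k) →
      (∀ i, hi ≤ i → i < s.length → k ≤ Tv s i) →
      bsearchB ((List.range s.length).map (Tv s)) k fuel lo hi = mIdx s k := by
  intro fuel
  induction fuel with
  | zero =>
    intro lo hi hf hle hhi h1 h2
    show lo = mIdx s k
    exact (mIdx_eq_of s k lo (by omega) h1 (fun h => h2 lo (by omega) h)).symm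
  | succ f ih =>
    intro lo hi hf hle hhi h1 h2
    rcases Nat.lt_or_ge lo hi with hlt | hge
    · show (if lo < hi then
          if PySem.List.pyGetD ((List.range s.length).map (Tv s)) (((lo + hi) / 2 : Nat) : Int) 0 < k
          then bsearchB ((List.range s.length).map (Tv s)) k f ((lo + hi) / 2 + 1) hi
          else bsearchB ((List.range s.length).map (Tv s)) k f lo ((lo + hi) / 2)
        else lo) = mIdx s k
      rw [if_pos hlt]
      have hmid1 : lo ≤ (lo + hi) / 2 := by omega
      have hmid2 : (lo + hi) / 2 < hi := by omega
      have hmn : (lo + hi) / 2 < s.length := by omega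
      rw [getD_T s _ hmn]
      by_cases hc : Tv s ((lo + hi) / 2) < k
      · rw [if_pos hc]
        exact ih ((lo + hi) / 2 + 1) hi (by omega) (by omega) hhi
          (fun i hi' => lt_of_le_of_lt (Tv_mono s hs i ((lo+hi)/2) (by omega) hmn) hc) h2
      · rw [if_neg hc]
        exact ih lo ((lo + hi) / 2) (by omega) (by omega) (by omega) h1
          (fun i hi' hin => le_trans (not_lt.1 hc) (Tv_mono s hs ((lo+hi)/2) i hi' hin))
    · show (if lo < hi then _ else lo) = mIdx s k
      rw [if_neg (by omega)]
      exact (mIdx_eq_of s k lo (by omega) h1 (fun h => h2 lo (by omega) h)).symm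

lemma foldT_char (s : List (Int × Int)) :
    ((PySem.List.pyRange 0 (s.length : Int) 1).foldl
      (fun (st : Int × List Int) j =>
        let t := (PySem.List.pyGetD s j (0, 0)).1
        let pre := st.1 + t
        (pre, st.2 ++ [pre + t * ((s.length : Int) - 1 - j)])) (0, [])).2
      = (List.range s.length).map (Tv s) := by
  have key : ∀ m, m ≤ s.length →
      ((List.range m).map (fun k : Nat => (k : Int))).foldl
        (fun (st : Int × List Int) j =>
          let t := (PySem.List.pyGetD s j (0, 0)).1
          let pre := st.1 + t
          (pre, st.2 ++ [pre + t * ((s.length : Int) - 1 - j)])) (0, [])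
      = (((s.map Prod.fst).take m).sum, (List.range m).map (Tv s)) := by
    intro m
    induction m with
    | zero => intro _; simp
    | succ m ih =>
      intro hm
      have hlt : m < s.length := by omega
      rw [List.range_succ]
      simp only [List.map_append, List.map_cons, List.map_nil, List.foldl_append,
        List.foldl_cons, List.foldl_nil]
      rw [ih (by omega)]
      simp only [PySem.List.pyGetD_natCast, fst_getD]
      rw [sum_take_succ_getD _ m (by simpa using hlt)]
      refine Prod.ext rfl ?_
      simp only [Tv]
      rw [sum_take_succ_getD _ m (by simpa using hlt)]
  rw [PySem.List.pyRange_zero_natCast, key s.length le_rfl]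

-- ===== VERDICT (by name: the statement is the Claim_ definition above) =====
theorem solution_spec : Claim_equal_solution := by
  intro food_times k _hdom hpre
  unfold Spec_solution
  by_cases hsum : food_times.sum ≤ k
  · simp [solution, solution_alt, hsum]
  · simp only [solution, solution_alt, if_neg hsum]
    set P := (PySem.List.enumerate food_times).map (fun p => (p.2, p.1 + 1)) with hP
    set s := PySem.List.sorted P (fun p => toLex p) false with hs
    have hheap : P.foldl heappushA [] = s := by
      rw [hs, PySem.List.sorted_eq_foldl_insertBy]
      rfl
    have hlen : s.length = food_times.length := by
      rw [hs, PySem.List.length_sorted, hP]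
      simp [PySem.List.length_enumerate]
    have hsumeq : (s.map Prod.fst).sum = food_times.sum := by
      have hperm : (s.map Prod.fst).Perm (P.map Prod.fst) :=
        (PySem.List.sorted_perm P (fun p => toLex p) false).map Prod.fst
      have hPfst : P.map Prod.fst = food_times := by
        rw [hP, List.map_map]
        exact PySem.List.map_snd_enumerate food_times 0
      rw [← hPfst]
      exact hperm.sum_eq
    have hne : food_times ≠ [] := by
      intro h
      have := hpre h
      rw [h] at hsum
      simp at hsum
      omega
    have hsne : s ≠ [] := by
      intro h
      apply hne
      have := hlen
      rw [h] at this
      exact (List.eq_nil_of_length_eq_zero this.symm)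
    have hm : mIdx s k < s.length := mIdx_lt_of s k hsne (by rw [hsumeq]; omega)
    have hfstmono : (s.map Prod.fst).Pairwise (· ≤ ·) := by
      have hp := PySem.List.sorted_pairwise P (fun p => toLex p)
      rw [← hs] at hp
      refine List.pairwise_map.2 (hp.imp ?_)
      intro a b hab
      rcases Prod.Lex.le_iff.1 hab with h | h
      · exact le_of_lt h
      · exact le_of_eq h.1
    have hloop : loopA s 0 k ((s.length : Int)) =
        (s.drop (mIdx s k), k - Tb s (mIdx s k), (s.length : Int) - (mIdx s k)) := by
      have h0 := loopA_char s k hm 0 (Nat.zero_le _)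
      simpa [tOf, Tb] using h0
    rw [hheap, ← hlen, hloop, foldT_char s]
    rw [bsearch_char s k hfstmono s.length 0 s.length (by omega) (by omega) le_rfl
      (fun i h => absurd h (Nat.not_lt_zero i)) (fun i h1 h2 => absurd h2 (by omega))]
    have hrem : (if 0 < mIdx s k then
        PySem.List.pyGetD ((List.range s.length).map (Tv s)) (((mIdx s k : Nat) : Int) - 1) 0
        else 0) = Tb s (mIdx s k) := by
      by_cases h0 : 0 < mIdx s k
      · rw [if_pos h0]
        have hc : ((mIdx s k : Nat) : Int) - 1 = ((mIdx s k - 1 : Nat) : Int) := by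
          rw [Nat.cast_sub h0]; simp
        rw [hc, getD_T s _ (by omega)]
        simp [Tb, Nat.pos_iff_ne_zero.1 h0]
      · rw [if_neg h0]
        have : mIdx s k = 0 := by omega
        simp [Tb, this]
    rw [hrem]
    have htail : (PySem.List.sorted (s.drop (mIdx s k)) (fun p => p.2) false).length
        = s.length - mIdx s k := by
      rw [PySem.List.length_sorted, List.length_drop]
    rw [htail]
    have hcast : ((s.length - mIdx s k : Nat) : Int) = (s.length : Int) - (mIdx s k : Nat) := by
      rw [Nat.cast_sub (le_of_lt hm)]
    rw [hcast]
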